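-- pv_equiv track=rewrite | github.com/xogo123/ADLxMLDS2017 | hw4/generate.py | text_pre
-- ===== SOURCE A (Python) =====
-- def text_pre(text) :
--     text = text.replace(',',' ')
--     lst_text = text.split(' ')
--     hair_i = 0
--     eyes_i = 0
--     for i,s in enumerate(lst_text) :
--         if s == 'hair' :
--             hair_i = i
--         elif s == 'eyes' :
--             eyes_i = i
--     if hair_i :
--         hair_style = lst_text[hair_i-1] + ' ' + lst_text[hair_i]
--     else :
--         hair_style = 'null'
--     if eyes_i :
--         eyes_style = lst_text[eyes_i-1] + ' ' + lst_text[eyes_i]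
--     else :
--         eyes_style = 'null'
--
--     return hair_style, eyes_style
-- ===== SOURCE B (Python) =====
-- def text_pre(text):
--     toks = text.replace(',', ' ').split(' ')
--
--     def last_idx(word):
--         # scan from the end; index of the last occurrence, or 0 if absent
--         for i in range(len(toks) - 1, -1, -1):
--             if toks[i] == word:
--                 return i
--         return 0
--
--     def style(word):
--         i = last_idx(word)
--         return toks[i - 1] + ' ' + toks[i] if i else 'null'
--
--     return style('hair'), style('eyes')
-- ===== Notes on version B (the rewrite author's own statement) =====
-- stated objective: alternative
-- what changed: B replaces A's single forward fold that tracks both indices with a reusable helper that scans the token list from the end and returns the last occurrence index (or 0), called once per target word; style strings are built by a shared helper.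
import Mathlib
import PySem

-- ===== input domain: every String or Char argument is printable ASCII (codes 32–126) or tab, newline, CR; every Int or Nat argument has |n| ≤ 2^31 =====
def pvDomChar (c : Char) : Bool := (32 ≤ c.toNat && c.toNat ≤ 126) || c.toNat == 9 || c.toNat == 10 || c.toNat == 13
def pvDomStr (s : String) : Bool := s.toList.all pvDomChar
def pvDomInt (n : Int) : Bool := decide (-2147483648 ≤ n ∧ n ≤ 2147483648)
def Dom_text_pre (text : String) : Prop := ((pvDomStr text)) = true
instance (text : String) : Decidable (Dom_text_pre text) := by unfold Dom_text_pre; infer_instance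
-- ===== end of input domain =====

-- B scans the token list from the end for each target word instead of one forward fold tracking both; same values everywhere.

-- ===== PORT A =====
def text_pre (text : String) : String × String :=
  let t := PySem.Str.replace text "," " "
  let lst := (PySem.Str.split? t " ").getD []  -- sep ≠ "", so split? is always some
  let hi := (PySem.List.enumerate lst).foldl
      (fun (p : Int × Int) (is : Int × String) =>
        if is.2 == "hair" then (is.1, p.2)
        else if is.2 == "eyes" then (p.1, is.1)
        else p) (0, 0)
  let hair_style := if hi.1 ≠ 0 then ((PySem.List.pyGet? lst (hi.1 - 1)).getD "") ++ " " ++ ((PySem.List.pyGet? lst hi.1).getD "") else "null"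
  let eyes_style := if hi.2 ≠ 0 then ((PySem.List.pyGet? lst (hi.2 - 1)).getD "") ++ " " ++ ((PySem.List.pyGet? lst hi.2).getD "") else "null"
  (hair_style, eyes_style)

-- ===== PORT B =====
-- B's reversed index loop, as recursion over the reversed enumerated token list (first match = last occurrence; 0 if none)
def lastIdxAux (word : String) : List (Int × String) → Int
  | [] => 0
  | (i, s) :: r => if s == word then i else lastIdxAux word r

def styleOf (toks : List String) (i : Int) : String :=
  if i ≠ 0 then ((PySem.List.pyGet? toks (i - 1)).getD "") ++ " " ++ ((PySem.List.pyGet? toks i).getD "") else "null"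

def text_pre_alt (text : String) : String × String :=
  let toks := (PySem.Str.split? (PySem.Str.replace text "," " ") " ").getD []
  let rev := (PySem.List.enumerate toks).reverse
  (styleOf toks (lastIdxAux "hair" rev), styleOf toks (lastIdxAux "eyes" rev))

-- ===== PRECONDITION & SPEC =====
def Spec_text_pre (text : String) (out : String × String) : Prop := out = text_pre_alt text
instance (text : String) (out : String × String) : Decidable (Spec_text_pre text out) := by unfold Spec_text_pre; infer_instance

-- ===== CLAIM (what is proved, stated in full; the proofs are below) =====
def Claim_equal_text_pre : Prop := ∀ (text : String), Dom_text_pre text → Spec_text_pre text (text_pre text)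

-- ===== LEMMAS AND PROOFS =====

-- proof helper: forward "keep the last match" scan with an explicit default
def lastFrom (word : String) (d : Int) : List (Int × String) → Int
  | [] => d
  | (i, s) :: r => lastFrom word (if s == word then i else d) r

-- proof helper: lastIdxAux with a general default
def lastIdxAuxD (word : String) (d : Int) : List (Int × String) → Int
  | [] => d
  | (i, s) :: r => if s == word then i else lastIdxAuxD word d r

theorem lastIdxAuxD_zero (word : String) (l : List (Int × String)) :
    lastIdxAuxD word 0 l = lastIdxAux word l := by
  induction l with
  | nil => rfl
  | cons p r ih => cases p; simp [lastIdxAuxD, lastIdxAux, ih]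

theorem lastIdxAuxD_snoc (word : String) (d : Int) (m : List (Int × String)) (i : Int) (s : String) :
    lastIdxAuxD word d (m ++ [(i, s)]) = lastIdxAuxD word (if s == word then i else d) m := by
  induction m generalizing d with
  | nil => rfl
  | cons p r ih => cases p; simp [lastIdxAuxD, ih]

theorem lastFrom_eq_rev (word : String) (d : Int) (l : List (Int × String)) :
    lastFrom word d l = lastIdxAuxD word d l.reverse := by
  induction l generalizing d with
  | nil => rfl
  | cons p r ih =>
    cases p with
    | mk i s => simp [lastFrom, List.reverse_cons, lastIdxAuxD_snoc, ih]

theorem foldl_eq_lastFrom (l : List (Int × String)) (a b : Int) :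
    l.foldl (fun (p : Int × Int) (is : Int × String) =>
        if is.2 == "hair" then (is.1, p.2)
        else if is.2 == "eyes" then (p.1, is.1)
        else p) (a, b)
      = (lastFrom "hair" a l, lastFrom "eyes" b l) := by
  induction l generalizing a b with
  | nil => rfl
  | cons p r ih =>
    cases p with
    | mk i s =>
      by_cases hh : s = "hair"
      · subst hh; simpa [lastFrom] using ih i b
      · by_cases he : s = "eyes"
        · subst he; simpa [lastFrom] using ih a i
        · simpa [lastFrom, hh, he] using ih a b

-- ===== VERDICT (by name: the statement is the Claim_ definition above) =====
theorem text_pre_spec : Claim_equal_text_pre := by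
  intro text _
  unfold Spec_text_pre text_pre text_pre_alt
  simp only [foldl_eq_lastFrom, lastFrom_eq_rev, lastIdxAuxD_zero, styleOf]
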